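-- pv_equiv track=rewrite | github.com/JudoWill/flELM | cluster_elmSeqs.py | check_clusters
-- ===== SOURCE A (Python) =====
-- def check_clusters(cluster2seq, host_counts, flu_counts, elm):
--     """make sure flu sequences are not in clusters alone"""
--
--     host_seqs = {}
--     for host in host_counts:
--         for elmSeq in host_counts[host]:
--             helm,hseq = elmSeq.split(':')
--             if helm == elm:
--                 host_seqs[hseq] = True
--     flu_seqs = {}
--     for flu in flu_counts:
--         for elmSeq in flu_counts[flu]:
--             helm,hseq = elmSeq.split(':')
--             if helm == elm:
--                 flu_seqs[hseq] = True
--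
--     for cluster in cluster2seq:
--         found_host = False
--         found_flu = False
--         for seq in cluster2seq[cluster]:
--
--             if seq in host_seqs:
--                 found_host = True
--             if seq in flu_seqs:
--                 found_flu = True
--         if found_flu and not found_host:
--             return False
--     return True
-- ===== SOURCE B (Python) =====
-- def _hits(counts, elm, seq2clusters):
--     """cluster indices reached by the sequences `counts` attaches to `elm`"""
--     hit = set()
--     for key in counts:
--         for elmSeq in counts[key]:
--             helm, hseq = elmSeq.split(':')
--             if helm == elm:
--                 hit.update(seq2clusters.get(hseq, ()))
--     return hit
--
--
-- def check_clusters(cluster2seq, host_counts, flu_counts, elm):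
--     """make sure flu sequences are not in clusters alone"""
--     # inverted index: sequence -> indices of the clusters that contain it
--     seq2clusters = {}
--     for i, seqs in enumerate(cluster2seq.values()):
--         for seq in seqs:
--             seq2clusters.setdefault(seq, []).append(i)
--     host_hit = _hits(host_counts, elm, seq2clusters)
--     flu_hit = _hits(flu_counts, elm, seq2clusters)
--     # a cluster is bad iff its index is flu-hit but not host-hit
--     return flu_hit <= host_hit
-- ===== Notes on version B (the rewrite author's own statement) =====
-- stated objective: alternative
-- what changed: B inverts the traversal: it builds an inverted index sequence->cluster indices once, accumulates the sets of cluster indices hit by host-relevant and flu-relevant sequences while scanning the count lists, and answers with a subset test flu_hit <= host_hit, so the per-cluster membership scan with two flags disappears.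
import Mathlib
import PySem

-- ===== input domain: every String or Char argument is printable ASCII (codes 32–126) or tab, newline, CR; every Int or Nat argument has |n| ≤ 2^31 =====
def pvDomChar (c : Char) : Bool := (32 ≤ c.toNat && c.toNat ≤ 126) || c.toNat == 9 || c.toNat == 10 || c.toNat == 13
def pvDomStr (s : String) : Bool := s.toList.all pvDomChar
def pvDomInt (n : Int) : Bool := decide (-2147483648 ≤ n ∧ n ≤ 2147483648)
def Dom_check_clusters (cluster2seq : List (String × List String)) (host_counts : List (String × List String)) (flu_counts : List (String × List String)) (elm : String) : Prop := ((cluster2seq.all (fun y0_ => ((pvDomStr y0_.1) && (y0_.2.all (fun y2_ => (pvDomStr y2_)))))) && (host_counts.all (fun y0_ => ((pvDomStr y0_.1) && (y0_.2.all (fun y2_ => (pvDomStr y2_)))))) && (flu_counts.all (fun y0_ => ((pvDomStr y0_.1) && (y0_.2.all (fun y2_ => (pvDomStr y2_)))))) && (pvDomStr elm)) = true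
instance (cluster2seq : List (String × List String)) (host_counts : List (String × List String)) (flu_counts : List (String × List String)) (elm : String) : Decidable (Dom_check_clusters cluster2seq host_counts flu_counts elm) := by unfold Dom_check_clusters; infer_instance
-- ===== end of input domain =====

-- B inverts the traversal: an inverted index sequence -> cluster indices, hit-index sets for
-- host and flu accumulated from the count lists, and a subset test flu_hit <= host_hit.

-- ===== PORT A =====
-- host_seqs / flu_seqs build loop of A: nested for over the dict's values,
-- `helm,hseq = elmSeq.split(':')` (ValueError when not exactly 2 parts — excluded by Pre_),
-- `if helm == elm: d[hseq] = True`
def pvGatherA (counts : List (String × List String)) (elm : String) : PySem.Dict String Bool :=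
  counts.foldl (fun d host =>
    host.2.foldl (fun d2 elmSeq =>
      match PySem.Str.split? elmSeq ":" with
      | some [helm, hseq] => if helm = elm then d2.insert hseq true else d2
      | _ => d2) d) PySem.Dict.empty

-- A's cluster loop: two Boolean flags per cluster, early `return False`
def pvClusterLoopA (clusters : List (String × List String))
    (host_seqs flu_seqs : PySem.Dict String Bool) : Bool :=
  match clusters with
  | [] => true
  | cluster :: rest =>
    let fl := cluster.2.foldl
      (fun (fl : Bool × Bool) seq =>
        (fl.1 || host_seqs.contains seq, fl.2 || flu_seqs.contains seq)) (false, false)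
    if fl.2 && !fl.1 then false else pvClusterLoopA rest host_seqs flu_seqs

def check_clusters (cluster2seq : List (String × List String)) (host_counts : List (String × List String)) (flu_counts : List (String × List String)) (elm : String) : Bool :=
  let host_seqs := pvGatherA host_counts elm
  let flu_seqs := pvGatherA flu_counts elm
  pvClusterLoopA cluster2seq host_seqs flu_seqs

-- ===== PORT B =====
-- B's index build loop: `for i, seqs in enumerate(cluster2seq.values()): for seq in seqs:
-- seq2clusters.setdefault(seq, []).append(i)`
def pvIndexB (cluster2seq : List (String × List String)) : PySem.Dict String (List Int) :=
  (PySem.List.enumerate (cluster2seq.map (fun p => p.2))).foldl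
    (fun d p => p.2.foldl (fun d2 seq => d2.modify seq [] (fun l => l ++ [p.1])) d)
    PySem.Dict.empty

-- B's `_hits` helper: `hit.update(seq2clusters.get(hseq, ()))` under the same split/filter
def pvHitsB (counts : List (String × List String)) (elm : String)
    (idx : PySem.Dict String (List Int)) : PySem.Set Int :=
  counts.foldl (fun hit key =>
    key.2.foldl (fun h2 elmSeq =>
      match PySem.Str.split? elmSeq ":" with
      | some [helm, hseq] => if helm = elm then PySem.Set.update h2 (idx.getD hseq []) else h2
      | _ => h2) hit) PySem.Set.empty

def check_clusters_alt (cluster2seq : List (String × List String)) (host_counts : List (String × List String)) (flu_counts : List (String × List String)) (elm : String) : Bool :=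
  let seq2clusters := pvIndexB cluster2seq
  let host_hit := pvHitsB host_counts elm seq2clusters
  let flu_hit := pvHitsB flu_counts elm seq2clusters
  PySem.Set.issubset flu_hit host_hit

-- ===== PRECONDITION & SPEC =====
-- Pre_ excludes exactly the inputs on which A raises ValueError: some string in the
-- host/flu count lists does not split on ':' into exactly two parts.
def Pre_check_clusters (cluster2seq : List (String × List String)) (host_counts : List (String × List String)) (flu_counts : List (String × List String)) (elm : String) : Prop :=
  (∀ p ∈ host_counts, ∀ s ∈ p.2, ((PySem.Str.split? s ":").getD []).length = 2) ∧
  (∀ p ∈ flu_counts, ∀ s ∈ p.2, ((PySem.Str.split? s ":").getD []).length = 2)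
instance (cluster2seq : List (String × List String)) (host_counts : List (String × List String)) (flu_counts : List (String × List String)) (elm : String) : Decidable (Pre_check_clusters cluster2seq host_counts flu_counts elm) := by unfold Pre_check_clusters; infer_instance

def pvWitness_check_clusters : (List (String × List String)) × (List (String × List String)) × (List (String × List String)) × String :=
  ([("c1", ["SEQ", "XYZ"])], [("host", ["E:SEQ"])], [("flu", ["E:SEQ", "F:XYZ"])], "E")

def Spec_check_clusters (cluster2seq : List (String × List String)) (host_counts : List (String × List String)) (flu_counts : List (String × List String)) (elm : String) (out : Bool) : Prop := out = check_clusters_alt cluster2seq host_counts flu_counts elm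
instance (cluster2seq : List (String × List String)) (host_counts : List (String × List String)) (flu_counts : List (String × List String)) (elm : String) (out : Bool) : Decidable (Spec_check_clusters cluster2seq host_counts flu_counts elm out) := by unfold Spec_check_clusters; infer_instance

-- ===== CLAIM (what is proved, stated in full; the proofs are below) =====
def Claim_equal_check_clusters : Prop := ∀ (cluster2seq : List (String × List String)) (host_counts : List (String × List String)) (flu_counts : List (String × List String)) (elm : String), Dom_check_clusters cluster2seq host_counts flu_counts elm → Pre_check_clusters cluster2seq host_counts flu_counts elm → Spec_check_clusters cluster2seq host_counts flu_counts elm (check_clusters cluster2seq host_counts flu_counts elm)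

-- ===== LEMMAS AND PROOFS =====

-- the suffixes the build loops keep: `hseq` for the strings splitting as `elm ++ ":" ++ hseq`
def pvExtract (elm : String) (s : String) : Option String :=
  match PySem.Str.split? s ":" with
  | some [a, b] => if a = elm then some b else none
  | _ => none

def pvRel (counts : List (String × List String)) (elm : String) : List String :=
  (counts.flatMap (fun p => p.2)).filterMap (pvExtract elm)

-- membership in A's inner build loop = membership in the extracted suffix list
theorem pv_inner_contains (elm : String) (l : List String) (d : PySem.Dict String Bool) (x : String) :
    (l.foldl (fun d2 elmSeq =>
      match PySem.Str.split? elmSeq ":" with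
      | some [helm, hseq] => if helm = elm then d2.insert hseq true else d2
      | _ => d2) d).contains x
    = (d.contains x || decide (x ∈ l.filterMap (pvExtract elm))) := by
  induction l generalizing d with
  | nil => simp
  | cons s t ih =>
    rcases hs : PySem.Str.split? s ":" with _ | (_ | ⟨a, _ | ⟨b, _ | _⟩⟩) <;>
      simp only [List.foldl_cons, List.filterMap_cons, pvExtract, hs, ih] <;> try rfl
    by_cases hae : a = elm
    · by_cases hxb : x = b <;>
        simp [hae, hxb, PySem.Dict.contains_insert, Bool.or_assoc]
    · simp [hae]

theorem pv_gather_contains (counts : List (String × List String)) (elm : String) (x : String) :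
    (pvGatherA counts elm).contains x = decide (x ∈ pvRel counts elm) := by
  unfold pvGatherA pvRel
  have main : ∀ (cs : List (String × List String)) (d : PySem.Dict String Bool),
      (cs.foldl (fun d host =>
        host.2.foldl (fun d2 elmSeq =>
          match PySem.Str.split? elmSeq ":" with
          | some [helm, hseq] => if helm = elm then d2.insert hseq true else d2
          | _ => d2) d) d).contains x
      = (d.contains x || decide (x ∈ (cs.flatMap (fun p => p.2)).filterMap (pvExtract elm))) := by
    intro cs
    induction cs with
    | nil => simp
    | cons c t ih =>
      intro d
      simp only [List.foldl_cons, List.flatMap_cons, List.filterMap_append, ih,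
        pv_inner_contains, List.mem_append]
      by_cases h1 : x ∈ c.2.filterMap (pvExtract elm) <;> simp [h1]
  rw [main]
  simp

-- membership in B's inner hits loop = hit via some relevant suffix
theorem pv_hits_inner_mem (elm : String) (idx : PySem.Dict String (List Int))
    (l : List String) (h : PySem.Set Int) (i : Int) :
    (i ∈ l.foldl (fun h2 elmSeq =>
      match PySem.Str.split? elmSeq ":" with
      | some [helm, hseq] => if helm = elm then PySem.Set.update h2 (idx.getD hseq []) else h2
      | _ => h2) h)
    ↔ (i ∈ h ∨ ∃ s ∈ l.filterMap (pvExtract elm), i ∈ idx.getD s []) := by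
  induction l generalizing h with
  | nil => simp
  | cons s t ih =>
    rw [List.foldl_cons, List.filterMap_cons]
    rcases hs : PySem.Str.split? s ":" with _ | (_ | ⟨a, _ | ⟨b, _ | _⟩⟩) <;>
      simp only [pvExtract, hs] <;> try exact ih h
    by_cases hae : a = elm
    · simp only [if_pos hae]
      rw [ih]
      simp only [PySem.Set.mem_update, List.mem_cons]
      constructor
      · rintro (⟨hi | hi⟩ | ⟨x, hx, hix⟩)
        · exact Or.inl hi
        · exact Or.inr ⟨b, Or.inl rfl, hi⟩
        · exact Or.inr ⟨x, Or.inr hx, hix⟩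
      · rintro (hi | ⟨x, (rfl | hx), hix⟩)
        · exact Or.inl (Or.inl hi)
        · exact Or.inl (Or.inr hix)
        · exact Or.inr ⟨x, hx, hix⟩
    · simp only [if_neg hae]
      exact ih h

theorem pv_hits_mem (counts : List (String × List String)) (elm : String)
    (idx : PySem.Dict String (List Int)) (i : Int) :
    (i ∈ pvHitsB counts elm idx) ↔ ∃ s ∈ pvRel counts elm, i ∈ idx.getD s [] := by
  unfold pvHitsB pvRel
  have main : ∀ (cs : List (String × List String)) (h : PySem.Set Int),
      (i ∈ cs.foldl (fun hit key =>
        key.2.foldl (fun h2 elmSeq =>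
          match PySem.Str.split? elmSeq ":" with
          | some [helm, hseq] => if helm = elm then PySem.Set.update h2 (idx.getD hseq []) else h2
          | _ => h2) hit) h)
      ↔ (i ∈ h ∨ ∃ s ∈ (cs.flatMap (fun p => p.2)).filterMap (pvExtract elm), i ∈ idx.getD s []) := by
    intro cs
    induction cs with
    | nil => simp
    | cons c t ih =>
      intro h
      simp only [List.foldl_cons, List.flatMap_cons, List.filterMap_append, ih,
        pv_hits_inner_mem, List.mem_append]
      constructor
      · rintro ((hi | ⟨s, hs, his⟩) | ⟨s, hs, his⟩)
        · exact Or.inl hi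
        · exact Or.inr ⟨s, Or.inl hs, his⟩
        · exact Or.inr ⟨s, Or.inr hs, his⟩
      · rintro (hi | ⟨s, (hs | hs), his⟩)
        · exact Or.inl (Or.inl hi)
        · exact Or.inl (Or.inr ⟨s, hs, his⟩)
        · exact Or.inr ⟨s, hs, his⟩
  rw [main]
  simp [PySem.Set.empty]

-- the inverted index: i is listed under s iff cluster number i contains s
theorem pv_index_mem (cluster2seq : List (String × List String)) (s : String) (i : Int) :
    (i ∈ (pvIndexB cluster2seq).getD s [])
    ↔ ∃ (k : Nat) (hk : k < cluster2seq.length), i = (k : Int) ∧ s ∈ cluster2seq[k].2 := by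
  unfold pvIndexB
  have flat : ∀ (ps : List (Int × List String)) (d : PySem.Dict String (List Int)),
      ps.foldl (fun d p => p.2.foldl (fun d2 seq => d2.modify seq [] (fun l => l ++ [p.1])) d) d
      = (ps.flatMap (fun p => p.2.map (fun seq => (seq, p.1)))).foldl
          (fun d q => d.modify q.1 [] (fun l => l ++ [q.2])) d := by
    intro ps
    induction ps with
    | nil => simp
    | cons p t ih =>
      intro d
      simp only [List.foldl_cons, List.flatMap_cons, List.foldl_append, ih, List.foldl_map]
  rw [flat, PySem.Dict.getD_foldl_modify_append]
  simp only [PySem.Dict.getD_empty, List.nil_append, List.mem_map, List.mem_filter,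
    List.mem_flatMap, PySem.List.mem_enumerate_iff]
  constructor
  · rintro ⟨⟨s', j⟩, ⟨⟨⟨ji, seqs⟩, ⟨k, hk, hpk⟩, hmem⟩, hkey⟩, rfl⟩
    simp only [Prod.mk.injEq] at hpk
    obtain ⟨hji, hseqs⟩ := hpk
    simp only [List.mem_map, Prod.mk.injEq] at hmem
    obtain ⟨q, hq, hq1, hq2⟩ := hmem
    have hklen : k < cluster2seq.length := by simpa using hk
    refine ⟨k, hklen, ?_, ?_⟩
    · omega
    · have : s' = s := by simpa using hkey
      subst this
      rw [← hq1]
      have : seqs = cluster2seq[k].2 := by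
        rw [hseqs, List.getElem_map]
      rw [this] at hq; exact hq
  · rintro ⟨k, hk, rfl, hs⟩
    refine ⟨(s, (k : Int)), ⟨⟨((k : Int), cluster2seq[k].2), ⟨k, by simpa using hk, by simp⟩, ?_⟩, by simp⟩, rfl⟩
    simp only [List.mem_map]
    exact ⟨s, hs, rfl⟩

-- A's per-cluster flag fold computes the two 'any' facts
theorem pv_flags (hd fd : PySem.Dict String Bool) (l : List String) (b1 b2 : Bool) :
    l.foldl (fun (fl : Bool × Bool) seq =>
      (fl.1 || hd.contains seq, fl.2 || fd.contains seq)) (b1, b2)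
    = (b1 || l.any hd.contains, b2 || l.any fd.contains) := by
  induction l generalizing b1 b2 with
  | nil => simp
  | cons s t ih => simp [ih, Bool.or_assoc]

-- A's cluster loop answers the universal per-pair implication
theorem pv_loopA_iff (clusters : List (String × List String))
    (hd fd : PySem.Dict String Bool) :
    pvClusterLoopA clusters hd fd = true
    ↔ ∀ p ∈ clusters, (p.2.any fd.contains) = true → (p.2.any hd.contains) = true := by
  induction clusters with
  | nil => simp [pvClusterLoopA]
  | cons c t ih =>
    show (let fl := c.2.foldl _ (false, false);
          if fl.2 && !fl.1 then false else pvClusterLoopA t hd fd) = true ↔ _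
    simp only [pv_flags, Bool.false_or, List.mem_cons]
    by_cases hflu : c.2.any fd.contains = true
    · by_cases hhost : c.2.any hd.contains = true
      · simp only [hflu, hhost]
        constructor
        · intro h p hp
          rcases hp with rfl | hp
          · intro _; exact hhost
          · exact (ih.mp (by simpa using h)) p hp
        · intro h
          simpa using ih.mpr (fun p hp => h p (Or.inr hp))
      · simp only [hflu, Bool.eq_false_iff.mpr hhost]
        constructor
        · intro h; exact absurd h (by simp)
        · intro h
          exact absurd (h c (Or.inl rfl) hflu) hhost
    · simp only [Bool.eq_false_iff.mpr hflu]
      constructor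
      · intro h p hp
        rcases hp with rfl | hp
        · intro hf; exact absurd hf hflu
        · exact (ih.mp (by simpa using h)) p hp
      · intro h
        simpa using ih.mpr (fun p hp => h p (Or.inr hp))

-- ===== VERDICT (by name: the statement is the Claim_ definition above) =====
theorem check_clusters_spec : Claim_equal_check_clusters := by
  intro cluster2seq host_counts flu_counts elm _ _
  unfold Spec_check_clusters check_clusters check_clusters_alt
  rw [Bool.eq_iff_iff, pv_loopA_iff, PySem.Set.issubset_iff]
  have hmemA : ∀ (counts : List (String × List String)) (l : List String),
      (l.any (pvGatherA counts elm).contains) = true ↔ ∃ s ∈ l, s ∈ pvRel counts elm := by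
    intro counts l
    simp [List.any_eq_true, pv_gather_contains]
  constructor
  · intro hA i hiFlu
    rw [pv_hits_mem] at hiFlu ⊢
    obtain ⟨s, hsRel, hsIdx⟩ := hiFlu
    rw [pv_index_mem] at hsIdx
    obtain ⟨k, hk, rfl, hsk⟩ := hsIdx
    have := hA cluster2seq[k] (List.getElem_mem hk)
      ((hmemA flu_counts _).mpr ⟨s, hsk, hsRel⟩)
    obtain ⟨s', hs'k, hs'Rel⟩ := (hmemA host_counts _).mp this
    exact ⟨s', hs'Rel, (pv_index_mem cluster2seq s' _).mpr ⟨k, hk, rfl, hs'k⟩⟩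
  · intro hB p hp hflu
    obtain ⟨k, hk, rfl⟩ := List.getElem_of_mem hp
    obtain ⟨s, hsk, hsRel⟩ := (hmemA flu_counts _).mp hflu
    have hi : ((k : Int) ∈ pvHitsB flu_counts elm (pvIndexB cluster2seq)) := by
      rw [pv_hits_mem]
      exact ⟨s, hsRel, (pv_index_mem cluster2seq s _).mpr ⟨k, hk, rfl, hsk⟩⟩
    have := hB _ hi
    rw [pv_hits_mem] at this
    obtain ⟨s', hs'Rel, hs'Idx⟩ := this
    rw [pv_index_mem] at hs'Idx
    obtain ⟨k', hk', hkk', hs'⟩ := hs'Idx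
    have : k' = k := by omega
    subst this
    exact (hmemA host_counts _).mpr ⟨s', hs', hs'Rel⟩
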